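-- pv_equiv track=rewrite | github.com/devhliu/GPUMCRPTDosimetry | scripts/analyze_radionuclides.py | classify_medical_purpose
-- ===== SOURCE A (Python) =====
-- MEDICAL_RADIONUCLIDES = {
--     # Imaging radionuclides
--     'imaging': {
--         'F-18', 'Tc-99m', 'I-123', 'I-131', 'Ga-67', 'Ga-68', 'In-111', 'Tl-201',
--         'Xe-133', 'Kr-81m', 'Rb-82', 'C-11', 'N-13', 'O-15', 'Cu-64', 'Zr-89',
--         'I-124', 'Y-86', 'Br-76'
--     },
--     # Therapy radionuclides
--     'therapy': {
--         'I-131', 'Y-90', 'Lu-177', 'Ra-223', 'Sm-153', 'Sr-89', 'P-32', 'Re-186',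
--         'Re-188', 'Ho-166', 'Cu-67', 'At-211', 'Bi-213', 'Ac-225', 'Tb-149',
--         'Pb-212', 'Fr-221', 'Rn-219', 'Tb-161'
--     },
--     # Common parent radionuclides that produce medical daughters
--     'parent': {
--         'Ac-225',
--         'Ra-223', 'Th-227'
--     }
-- }
--
-- MEDICAL_DECAY_CHAINS = {
--     # Ac-225 decay chain (alpha therapy)
--     'Ac-225': {'Fr-221', 'At-217', 'Bi-213', 'Po-213', 'Pb-209', 'Tl-209'},
--     # Ra-223 decay chain (alpha therapy - Xofigo)
--     'Ra-223': {'Rn-219', 'Po-215', 'Pb-211', 'Bi-211', 'Tl-207', 'Po-211'},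
--     # Th-227 decay chain
--     'Th-227': {'Ra-223', 'Rn-219', 'Po-215', 'Pb-211', 'Bi-211', 'Tl-207'}
-- }
--
-- def classify_medical_purpose(radionuclide_name):
--     """Classify radionuclide based on medical purpose"""
--
--     # Check if it's a direct medical radionuclide for imaging
--     if radionuclide_name in MEDICAL_RADIONUCLIDES['imaging']:
--         return 'Medical - Imaging'
--
--     # Check if it's a direct medical radionuclide for therapy
--     elif radionuclide_name in MEDICAL_RADIONUCLIDES['therapy']:
--         return 'Medical - Therapy'
--
--     # Check if it's a parent radionuclide that produces medical daughters
--     elif radionuclide_name in MEDICAL_RADIONUCLIDES['parent']: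
--         return 'Medical - Parent (Generator)'
--
--     # Check if it's a daughter in medical decay chains
--     for parent, daughters in MEDICAL_DECAY_CHAINS.items():
--         if radionuclide_name in daughters:
--             # Check if the parent is a medical radionuclide
--             if (parent in MEDICAL_RADIONUCLIDES['imaging'] or
--                 parent in MEDICAL_RADIONUCLIDES['therapy'] or
--                 parent in MEDICAL_RADIONUCLIDES['parent']):
--                 return f'Medical - Daughter of {parent}'
--
--     return 'Non-Medical'
-- ===== SOURCE B (Python) =====
-- # Precomputed flat classification table: the priority chain of A is folded
-- # into one literal name -> label mapping; the function is a single lookup.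
-- _LABELS = {
--     'Ac-225': 'Medical - Therapy',
--     'At-211': 'Medical - Therapy',
--     'At-217': 'Medical - Daughter of Ac-225',
--     'Bi-211': 'Medical - Daughter of Ra-223',
--     'Bi-213': 'Medical - Therapy',
--     'Br-76': 'Medical - Imaging',
--     'C-11': 'Medical - Imaging',
--     'Cu-64': 'Medical - Imaging',
--     'Cu-67': 'Medical - Therapy',
--     'F-18': 'Medical - Imaging',
--     'Fr-221': 'Medical - Therapy',
--     'Ga-67': 'Medical - Imaging',
--     'Ga-68': 'Medical - Imaging',
--     'Ho-166': 'Medical - Therapy',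
--     'I-123': 'Medical - Imaging',
--     'I-124': 'Medical - Imaging',
--     'I-131': 'Medical - Imaging',
--     'In-111': 'Medical - Imaging',
--     'Kr-81m': 'Medical - Imaging',
--     'Lu-177': 'Medical - Therapy',
--     'N-13': 'Medical - Imaging',
--     'O-15': 'Medical - Imaging',
--     'P-32': 'Medical - Therapy',
--     'Pb-209': 'Medical - Daughter of Ac-225',
--     'Pb-211': 'Medical - Daughter of Ra-223',
--     'Pb-212': 'Medical - Therapy',
--     'Po-211': 'Medical - Daughter of Ra-223',
--     'Po-213': 'Medical - Daughter of Ac-225',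
--     'Po-215': 'Medical - Daughter of Ra-223',
--     'Ra-223': 'Medical - Therapy',
--     'Rb-82': 'Medical - Imaging',
--     'Re-186': 'Medical - Therapy',
--     'Re-188': 'Medical - Therapy',
--     'Rn-219': 'Medical - Therapy',
--     'Sm-153': 'Medical - Therapy',
--     'Sr-89': 'Medical - Therapy',
--     'Tb-149': 'Medical - Therapy',
--     'Tb-161': 'Medical - Therapy',
--     'Tc-99m': 'Medical - Imaging',
--     'Th-227': 'Medical - Parent (Generator)',
--     'Tl-201': 'Medical - Imaging',
--     'Tl-207': 'Medical - Daughter of Ra-223',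
--     'Tl-209': 'Medical - Daughter of Ac-225',
--     'Xe-133': 'Medical - Imaging',
--     'Y-86': 'Medical - Imaging',
--     'Y-90': 'Medical - Therapy',
--     'Zr-89': 'Medical - Imaging',
-- }
--
--
-- def classify_medical_purpose(radionuclide_name):
--     """Classify radionuclide based on medical purpose"""
--     return _LABELS.get(radionuclide_name, 'Non-Medical')
-- ===== Notes on version B (the rewrite author's own statement) =====
-- stated objective: simpler
-- what changed: The run-time branch chain plus loop over decay chains (with a parent-medicality re-check) is folded once into a single flat literal name-to-label table, and the function body becomes one lookup with default 'Non-Medical'.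
import Mathlib
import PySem

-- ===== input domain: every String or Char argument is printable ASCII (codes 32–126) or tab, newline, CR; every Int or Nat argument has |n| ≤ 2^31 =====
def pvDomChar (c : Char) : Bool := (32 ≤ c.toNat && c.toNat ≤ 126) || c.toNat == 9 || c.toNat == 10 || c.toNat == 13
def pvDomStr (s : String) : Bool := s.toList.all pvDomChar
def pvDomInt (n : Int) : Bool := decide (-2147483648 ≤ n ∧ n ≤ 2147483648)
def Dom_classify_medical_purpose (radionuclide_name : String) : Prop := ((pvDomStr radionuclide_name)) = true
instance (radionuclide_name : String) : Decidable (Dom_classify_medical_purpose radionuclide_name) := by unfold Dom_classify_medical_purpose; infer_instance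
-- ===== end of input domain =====

set_option maxRecDepth 10000

-- ===== PORT A =====
-- B folds A's priority chain of set checks and its decay-chain loop into one
-- flat literal name->label table; the body is a single lookup (objective: simpler).
def pvImaging : PySem.Set String := PySem.Set.ofList ["F-18", "Tc-99m", "I-123", "I-131", "Ga-67", "Ga-68", "In-111", "Tl-201", "Xe-133", "Kr-81m", "Rb-82", "C-11", "N-13", "O-15", "Cu-64", "Zr-89", "I-124", "Y-86", "Br-76"]

def pvTherapy : PySem.Set String := PySem.Set.ofList ["I-131", "Y-90", "Lu-177", "Ra-223", "Sm-153", "Sr-89", "P-32", "Re-186", "Re-188", "Ho-166", "Cu-67", "At-211", "Bi-213", "Ac-225", "Tb-149", "Pb-212", "Fr-221", "Rn-219", "Tb-161"]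

def pvParent : PySem.Set String := PySem.Set.ofList ["Ac-225", "Ra-223", "Th-227"]

def pvChains : List (String × PySem.Set String) := [("Ac-225", PySem.Set.ofList ["Fr-221", "At-217", "Bi-213", "Po-213", "Pb-209", "Tl-209"]), ("Ra-223", PySem.Set.ofList ["Rn-219", "Po-215", "Pb-211", "Bi-211", "Tl-207", "Po-211"]), ("Th-227", PySem.Set.ofList ["Ra-223", "Rn-219", "Po-215", "Pb-211", "Bi-211", "Tl-207"])]

def pvParentMedical (p : String) : Bool :=
  PySem.Set.contains pvImaging p || PySem.Set.contains pvTherapy p || PySem.Set.contains pvParent p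

-- the 'for parent, daughters in MEDICAL_DECAY_CHAINS.items():' loop with early return
def pvChainLoop (n : String) : List (String × PySem.Set String) → String
  | [] => "Non-Medical"
  | (p, ds) :: rest =>
    if PySem.Set.contains ds n then
      if pvParentMedical p then "Medical - Daughter of " ++ p
      else pvChainLoop n rest
    else pvChainLoop n rest

def classify_medical_purpose (radionuclide_name : String) : String :=
  if PySem.Set.contains pvImaging radionuclide_name then "Medical - Imaging"
  else if PySem.Set.contains pvTherapy radionuclide_name then "Medical - Therapy"
  else if PySem.Set.contains pvParent radionuclide_name then "Medical - Parent (Generator)"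
  else pvChainLoop radionuclide_name pvChains

-- ===== PORT B =====
-- Source B's literal flat table _LABELS (a dict literal; all keys distinct)
def pvLabels : List (String × String) := [
  ("Ac-225", "Medical - Therapy"),
  ("At-211", "Medical - Therapy"),
  ("At-217", "Medical - Daughter of Ac-225"),
  ("Bi-211", "Medical - Daughter of Ra-223"),
  ("Bi-213", "Medical - Therapy"),
  ("Br-76", "Medical - Imaging"),
  ("C-11", "Medical - Imaging"),
  ("Cu-64", "Medical - Imaging"),
  ("Cu-67", "Medical - Therapy"),
  ("F-18", "Medical - Imaging"),
  ("Fr-221", "Medical - Therapy"),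
  ("Ga-67", "Medical - Imaging"),
  ("Ga-68", "Medical - Imaging"),
  ("Ho-166", "Medical - Therapy"),
  ("I-123", "Medical - Imaging"),
  ("I-124", "Medical - Imaging"),
  ("I-131", "Medical - Imaging"),
  ("In-111", "Medical - Imaging"),
  ("Kr-81m", "Medical - Imaging"),
  ("Lu-177", "Medical - Therapy"),
  ("N-13", "Medical - Imaging"),
  ("O-15", "Medical - Imaging"),
  ("P-32", "Medical - Therapy"),
  ("Pb-209", "Medical - Daughter of Ac-225"),
  ("Pb-211", "Medical - Daughter of Ra-223"),
  ("Pb-212", "Medical - Therapy"),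
  ("Po-211", "Medical - Daughter of Ra-223"),
  ("Po-213", "Medical - Daughter of Ac-225"),
  ("Po-215", "Medical - Daughter of Ra-223"),
  ("Ra-223", "Medical - Therapy"),
  ("Rb-82", "Medical - Imaging"),
  ("Re-186", "Medical - Therapy"),
  ("Re-188", "Medical - Therapy"),
  ("Rn-219", "Medical - Therapy"),
  ("Sm-153", "Medical - Therapy"),
  ("Sr-89", "Medical - Therapy"),
  ("Tb-149", "Medical - Therapy"),
  ("Tb-161", "Medical - Therapy"),
  ("Tc-99m", "Medical - Imaging"),
  ("Th-227", "Medical - Parent (Generator)"),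
  ("Tl-201", "Medical - Imaging"),
  ("Tl-207", "Medical - Daughter of Ra-223"),
  ("Tl-209", "Medical - Daughter of Ac-225"),
  ("Xe-133", "Medical - Imaging"),
  ("Y-86", "Medical - Imaging"),
  ("Y-90", "Medical - Therapy"),
  ("Zr-89", "Medical - Imaging")]

-- Source B's _LABELS.get(name, 'Non-Medical'): first-match scan of the table
def pvLookup (n : String) : List (String × String) → String
  | [] => "Non-Medical"
  | (k, v) :: rest => if n = k then v else pvLookup n rest

def classify_medical_purpose_alt (radionuclide_name : String) : String :=
  pvLookup radionuclide_name pvLabels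

-- ===== PRECONDITION & SPEC =====
def Spec_classify_medical_purpose (radionuclide_name : String) (out : String) : Prop := out = classify_medical_purpose_alt radionuclide_name
instance (radionuclide_name : String) (out : String) : Decidable (Spec_classify_medical_purpose radionuclide_name out) := by unfold Spec_classify_medical_purpose; infer_instance

-- ===== CLAIM (what is proved, stated in full; the proofs are below) =====
def Claim_equal_classify_medical_purpose : Prop := ∀ (radionuclide_name : String), Dom_classify_medical_purpose radionuclide_name → Spec_classify_medical_purpose radionuclide_name (classify_medical_purpose radionuclide_name)

-- ===== LEMMAS AND PROOFS =====
-- every name mentioned anywhere in either program's data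
def pvAllNames : List String := ["Ac-225", "At-211", "At-217", "Bi-211", "Bi-213", "Br-76", "C-11", "Cu-64", "Cu-67", "F-18", "Fr-221", "Ga-67", "Ga-68", "Ho-166", "I-123", "I-124", "I-131", "In-111", "Kr-81m", "Lu-177", "N-13", "O-15", "P-32", "Pb-209", "Pb-211", "Pb-212", "Po-211", "Po-213", "Po-215", "Ra-223", "Rb-82", "Re-186", "Re-188", "Rn-219", "Sm-153", "Sr-89", "Tb-149", "Tb-161", "Tc-99m", "Th-227", "Tl-201", "Tl-207", "Tl-209", "Xe-133", "Y-86", "Y-90", "Zr-89"]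

lemma pv_contains_false {n : String} (h : n ∉ pvAllNames) (s : List String)
    (hs : ∀ x ∈ s, x ∈ pvAllNames) : s.contains n = false := by
  simp only [List.contains_eq_mem, decide_eq_false_iff_not]
  exact fun hn => h (hs n hn)

lemma pv_lookup_notmem {n : String} (h : n ∉ pvAllNames) (l : List (String × String))
    (hl : ∀ kv ∈ l, kv.1 ∈ pvAllNames) : pvLookup n l = "Non-Medical" := by
  induction l with
  | nil => rfl
  | cons kv rest ih =>
    obtain ⟨k, v⟩ := kv
    rw [pvLookup]
    rw [if_neg (fun hnk => h (by rw [hnk]; exact hl (k, v) List.mem_cons_self))]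
    exact ih (fun kv hm => hl kv (List.mem_cons_of_mem _ hm))

lemma pv_notmem (n : String) (h : n ∉ pvAllNames) :
    classify_medical_purpose n = classify_medical_purpose_alt n := by
  have hA : classify_medical_purpose n = "Non-Medical" := by
    simp only [classify_medical_purpose, pvChains, pvChainLoop,
      PySem.Set.contains_eq_listContains,
      pv_contains_false h pvImaging (by decide),
      pv_contains_false h pvTherapy (by decide),
      pv_contains_false h pvParent (by decide),
      pv_contains_false h (PySem.Set.ofList ["Fr-221", "At-217", "Bi-213", "Po-213", "Pb-209", "Tl-209"]) (by decide),
      pv_contains_false h (PySem.Set.ofList ["Rn-219", "Po-215", "Pb-211", "Bi-211", "Tl-207", "Po-211"]) (by decide),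
      pv_contains_false h (PySem.Set.ofList ["Ra-223", "Rn-219", "Po-215", "Pb-211", "Bi-211", "Tl-207"]) (by decide),
      Bool.false_eq_true, if_false]
  have hB : classify_medical_purpose_alt n = "Non-Medical" :=
    pv_lookup_notmem h pvLabels (by decide)
  rw [hA, hB]

lemma pv_mem (n : String) (h : n ∈ pvAllNames) :
    classify_medical_purpose n = classify_medical_purpose_alt n := by
  fin_cases h <;> decide

-- ===== VERDICT (by name: the statement is the Claim_ definition above) =====
theorem classify_medical_purpose_spec : Claim_equal_classify_medical_purpose := by
  intro n _
  unfold Spec_classify_medical_purpose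
  by_cases h : n ∈ pvAllNames
  · exact pv_mem n h
  · exact pv_notmem n h
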